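-- pv_equiv track=rewrite | github.com/VoidWalkerAI/cavecode-arcade-planet | tools/validator/validate_cavecode.py | check_empty_blocks
-- ===== SOURCE A (Python) =====
-- from typing import List, Tuple
--
-- def check_empty_blocks(lines: List[str], blocks: List[Tuple[int, str]]) -> List[str]:
--     """
--     Very simple check: if a BLOCK has no non-empty lines between it and the next BLOCK,
--     warn about it.
--     """
--     warnings = []
--     if not blocks:
--         return warnings
--
--     # Add sentinel "end" at bottom
--     indices = [b[0] for b in blocks] + [len(lines) + 1]
--     for i in range(len(blocks)):
--         start_line = indices[i]
--         end_line = indices[i + 1]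
--         block_header = blocks[i][1]
--
--         # Look for any non-empty, non-separator line
--         body_lines = lines[start_line:end_line - 1]  # exclude next header line
--         has_content = any(l.strip() and not set(l.strip()) <= set("= ") for l in body_lines)
--
--         if not has_content:
--             warnings.append(f"[WARN] Block at line {start_line} ('{block_header}') appears empty.")
--     return warnings
-- ===== SOURCE B (Python) =====
-- from typing import List, Tuple
--
-- def check_empty_blocks(lines: List[str], blocks: List[Tuple[int, str]]) -> List[str]:
--     """One pass builds a prefix count of content lines; each block is then an
--     O(1) range query over its (normalised) slice bounds."""
--     if not blocks:
--         return []
--     pref = [0]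
--     for l in lines:
--         s = l.strip()
--         pref.append(pref[-1] + (1 if s and not set(s) <= set("= ") else 0))
--     starts = [b[0] for b in blocks]
--     ends = starts[1:] + [len(lines) + 1]
--     out = []
--     for (start, header), end in zip(blocks, ends):
--         a, b, _ = slice(start, end - 1).indices(len(lines))
--         if pref[b] <= pref[a]:
--             out.append(f"[WARN] Block at line {start} ('{header}') appears empty.")
--     return out
-- ===== Notes on version B (the rewrite author's own statement) =====
-- stated objective: alternative
-- what changed: B replaces A's per-block rescan of its sliced body with one pass building a prefix count of content lines, then judges each block by an O(1) range query over its slice bounds normalised with the built-in slice(...).indices.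
import Mathlib
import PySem

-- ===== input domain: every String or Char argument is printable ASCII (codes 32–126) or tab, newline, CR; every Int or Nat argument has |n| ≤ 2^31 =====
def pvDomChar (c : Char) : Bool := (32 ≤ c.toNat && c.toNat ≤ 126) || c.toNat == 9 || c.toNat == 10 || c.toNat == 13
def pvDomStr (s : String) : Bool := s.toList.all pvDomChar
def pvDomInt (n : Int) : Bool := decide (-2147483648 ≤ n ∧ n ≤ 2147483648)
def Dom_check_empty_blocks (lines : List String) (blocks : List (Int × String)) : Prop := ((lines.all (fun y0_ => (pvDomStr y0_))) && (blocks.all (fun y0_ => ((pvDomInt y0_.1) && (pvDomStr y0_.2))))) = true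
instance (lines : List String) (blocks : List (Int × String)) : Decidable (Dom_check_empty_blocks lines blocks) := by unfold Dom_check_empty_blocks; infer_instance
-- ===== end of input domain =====

-- B builds a prefix count of content lines in one pass, then judges each block by an
-- O(1) range query over its slice bounds normalised by slice(...).indices; same value.

-- the content test both Pythons contain: `l.strip() and not set(l.strip()) <= set("= ")`
-- (set inclusion ported exactly as "every char of the stripped line is '=' or ' '").
def pvIsContent (l : String) : Bool :=
  let s := PySem.Str.strip l
  decide (s ≠ "") && !(s.toList.all (fun c => c ∈ ("= ".toList)))

-- ===== PORT A =====
def check_empty_blocks (lines : List String) (blocks : List (Int × String)) : List String :=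
  let warnings : List String := []
  if blocks = [] then warnings
  else
    let indices : List Int := blocks.map (fun b => b.1) ++ [(lines.length : Int) + 1]
    (List.range blocks.length).foldl (fun warnings i =>
      let start_line := indices.getD i 0        -- in range by construction
      let end_line := indices.getD (i + 1) 0
      let block_header := (blocks.getD i (0, "")).2
      let body_lines := PySem.List.slice lines (some start_line) (some (end_line - 1))
      let has_content := body_lines.any pvIsContent
      if !has_content then
        warnings ++ ["[WARN] Block at line " ++ PySem.Int.toStr start_line ++ " ('" ++ block_header ++ "') appears empty."]
      else warnings) warnings

-- ===== PORT B =====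
-- Source B's `slice(start, end-1).indices(n)` (step 1) is exactly PySem.List.clampIdx on each bound.
def check_empty_blocks_alt (lines : List String) (blocks : List (Int × String)) : List String :=
  if blocks = [] then []
  else
    let n := lines.length
    let pref : List Nat := lines.scanl (fun acc l => if pvIsContent l then acc + 1 else acc) 0
    let ends : List Int := (blocks.map (fun b => b.1)).drop 1 ++ [(n : Int) + 1]
    (blocks.zip ends).foldl (fun out p =>
      let start := p.1.1
      let header := p.1.2
      let a := PySem.List.clampIdx n start
      let b := PySem.List.clampIdx n (p.2 - 1)
      if pref.getD b 0 ≤ pref.getD a 0 then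
        out ++ ["[WARN] Block at line " ++ PySem.Int.toStr start ++ " ('" ++ header ++ "') appears empty."]
      else out) []

-- ===== PRECONDITION & SPEC =====
def Spec_check_empty_blocks (lines : List String) (blocks : List (Int × String)) (out : List String) : Prop := out = check_empty_blocks_alt lines blocks
instance (lines : List String) (blocks : List (Int × String)) (out : List String) : Decidable (Spec_check_empty_blocks lines blocks out) := by unfold Spec_check_empty_blocks; infer_instance

-- ===== CLAIM =====
def Claim_equal_check_empty_blocks : Prop := ∀ (lines : List String) (blocks : List (Int × String)), Dom_check_empty_blocks lines blocks → Spec_check_empty_blocks lines blocks (check_empty_blocks lines blocks)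

-- ===== LEMMAS AND PROOFS =====

lemma clampIdx_le' (n : Nat) (i : Int) : PySem.List.clampIdx n i ≤ n := PySem.List.clampIdx_le n i

lemma scanl_count_getD {α : Type} (p : α → Bool) (xs : List α) (s k : Nat) (hk : k ≤ xs.length) :
    (xs.scanl (fun acc x => if p x then acc + 1 else acc) s).getD k 0 = s + (xs.take k).countP p := by
  induction xs generalizing s k with
  | nil =>
    have hk0 : k = 0 := by simpa using hk
    subst hk0
    simp
  | cons x xs ih =>
    cases k with
    | zero => simp [List.scanl_cons]
    | succ k =>
      simp only [List.scanl_cons, List.getD_cons_succ, List.take_succ_cons, List.countP_cons]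
      rw [ih _ k (by simpa using hk)]
      split_ifs <;> simp_all <;> omega

-- the heart of the equivalence: "no content line in the slice" ⟺ the prefix-count comparison
lemma cond_eq (lines : List String) (a0 b0 : Int) :
    (!(PySem.List.slice lines (some a0) (some b0)).any pvIsContent) =
      decide ((lines.scanl (fun acc l => if pvIsContent l then acc + 1 else acc) 0).getD
                 (PySem.List.clampIdx lines.length b0) 0 ≤
               (lines.scanl (fun acc l => if pvIsContent l then acc + 1 else acc) 0).getD
                 (PySem.List.clampIdx lines.length a0) 0) := by
  have hslice : PySem.List.slice lines (some a0) (some b0) =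
      (lines.drop (PySem.List.clampIdx lines.length a0)).take
        (PySem.List.clampIdx lines.length b0 - PySem.List.clampIdx lines.length a0) := rfl
  rw [hslice]
  have hAle := clampIdx_le' lines.length a0
  have hBle := clampIdx_le' lines.length b0
  generalize hA : PySem.List.clampIdx lines.length a0 = A at *
  generalize hB : PySem.List.clampIdx lines.length b0 = B at *
  rw [scanl_count_getD _ _ _ _ hBle, scanl_count_getD _ _ _ _ hAle]
  simp only [Nat.zero_add]
  have hany : ((lines.drop A).take (B - A)).any pvIsContent =
      decide (0 < ((lines.drop A).take (B - A)).countP pvIsContent) := by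
    rw [Bool.eq_iff_iff, List.any_eq_true, decide_eq_true_eq, List.countP_pos_iff]
  rw [hany]
  by_cases hba : B ≤ A
  · have h0 : B - A = 0 := by omega
    have htake : lines.take A = lines.take B ++ (lines.drop B).take (A - B) := by
      rw [← List.take_add]; congr 1; omega
    have hmono : (lines.take B).countP pvIsContent ≤ (lines.take A).countP pvIsContent := by
      rw [htake, List.countP_append]; omega
    simp only [h0, List.take_zero, List.countP_nil, Nat.lt_irrefl, decide_false,
      Bool.not_false, hmono, decide_true]
  · have hAB : A ≤ B := by omega
    have htake : lines.take B = lines.take A ++ (lines.drop A).take (B - A) := by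
      rw [← List.take_add]; congr 1; omega
    have hcnt : (lines.take B).countP pvIsContent =
        (lines.take A).countP pvIsContent + ((lines.drop A).take (B - A)).countP pvIsContent := by
      rw [htake, List.countP_append]
    rw [hcnt]
    rcases Nat.eq_zero_or_pos (((lines.drop A).take (B - A)).countP pvIsContent) with h0 | h0
    · simp [h0]
    · have h1 : ¬ ((lines.take A).countP pvIsContent + ((lines.drop A).take (B - A)).countP pvIsContent
          ≤ (lines.take A).countP pvIsContent) := by omega
      simp only [h0, decide_true, Bool.not_true, h1, decide_false]

-- the two iterations produce the same per-step data: index i of A's range loop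
-- corresponds to the i-th pair of B's zip
lemma zip_eq_range_map (lines : List String) (blocks : List (Int × String)) :
    blocks.zip ((blocks.map (fun b => b.1)).drop 1 ++ [(lines.length : Int) + 1]) =
      (List.range blocks.length).map (fun i =>
        (blocks.getD i (0, ""),
         (blocks.map (fun b => b.1) ++ [(lines.length : Int) + 1]).getD (i + 1) 0)) := by
  apply List.ext_getElem
  · simp [List.length_zip]
    omega
  · intro i h1 h2
    have hi : i < blocks.length := by
      simp [List.length_zip] at h1; omega
    simp only [List.getElem_zip, List.getElem_map, List.getElem_range, Prod.mk.injEq]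
    refine ⟨?_, ?_⟩
    · simp [List.getD, List.getElem?_eq_getElem hi]
    · by_cases hlast : i + 1 < blocks.length
      · have h1' : i < ((blocks.map (fun b => b.1)).drop 1).length := by simp; omega
        rw [List.getElem_append_left h1', List.getD_eq_getElem?_getD,
            List.getElem?_append_left (by simp; omega)]
        simp [List.getElem?_eq_getElem hlast]
      · have hieq : i + 1 = blocks.length := by omega
        have h1' : ((blocks.map (fun b => b.1)).drop 1).length = i := by simp; omega
        rw [List.getElem_append_right (by omega), List.getD_eq_getElem?_getD,
            List.getElem?_append_right (by simp; omega)]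
        simp [hieq]

-- ===== VERDICT =====
theorem check_empty_blocks_spec : Claim_equal_check_empty_blocks := by
  intro lines blocks _
  unfold Spec_check_empty_blocks check_empty_blocks check_empty_blocks_alt
  by_cases hb : blocks = []
  · simp [hb]
  · simp only [hb, if_false]
    rw [zip_eq_range_map, List.foldl_map]
    apply PySem.List.foldl_congr_mem
    intro acc i hmem
    simp only []
    have hi : i < blocks.length := by simpa [List.mem_range] using hmem
    have hstart : (blocks.map (fun b => b.1) ++ [(lines.length : Int) + 1]).getD i 0 =
        (blocks.getD i (0, "")).1 := by
      rw [List.getD_eq_getElem?_getD, List.getElem?_append_left (by simp; omega)]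
      simp [List.getD, List.getElem?_eq_getElem hi, List.getElem?_map]
    rw [← hstart, cond_eq]
    simp only [decide_eq_true_eq]
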